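-- pv_equiv track=rewrite | github.com/Futuretunes/UDM7-HA | custom_components/unifi_network_ha/image.py | _wifi_string
-- ===== SOURCE A (Python) =====
-- def _wifi_string(ssid: str, password: str, security: str = "WPA") -> str:
--     """Build a standard WiFi connection string for QR codes.
--
--     Format: ``WIFI:T:<type>;S:<ssid>;P:<password>;;``
--
--     Special characters in SSID and password are escaped per the spec.
--     """
--     def _escape(s: str) -> str:
--         for ch in ("\\", ";", ",", ":", '"'):
--             s = s.replace(ch, f"\\{ch}")
--         return s
--
--     sec = security.upper() if security else "WPA"
--     if sec not in ("WPA", "WEP", "nopass"):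
--         sec = "WPA"
--
--     parts = [f"WIFI:T:{sec}", f"S:{_escape(ssid)}"]
--     if sec != "nopass" and password:
--         parts.append(f"P:{_escape(password)}")
--     return ";".join(parts) + ";;"
-- ===== SOURCE B (Python) =====
-- _SPECIALS = '\\;,:"'
--
--
-- def _wifi_string(ssid: str, password: str, security: str = "WPA") -> str:
--     """Build a standard WiFi connection string for QR codes.
--
--     Single-pass per-character escaping, direct string assembly (no list/join).
--     """
--     def _escape(s: str) -> str:
--         return "".join("\\" + c if c in _SPECIALS else c for c in s)
--
--     sec = security.upper() if security else "WPA"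
--     if sec not in ("WPA", "WEP", "nopass"):
--         sec = "WPA"
--
--     res = "WIFI:T:" + sec + ";S:" + _escape(ssid)
--     if sec != "nopass" and password:
--         res += ";P:" + _escape(password)
--     return res + ";;"
-- ===== Notes on version B (the rewrite author's own statement) =====
-- stated objective: idiomatic
-- what changed: The five sequential whole-string replace passes are replaced by one single-pass per-character escape (join over a generator), and the parts-list + ';'.join assembly is replaced by direct string concatenation.
import Mathlib
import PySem

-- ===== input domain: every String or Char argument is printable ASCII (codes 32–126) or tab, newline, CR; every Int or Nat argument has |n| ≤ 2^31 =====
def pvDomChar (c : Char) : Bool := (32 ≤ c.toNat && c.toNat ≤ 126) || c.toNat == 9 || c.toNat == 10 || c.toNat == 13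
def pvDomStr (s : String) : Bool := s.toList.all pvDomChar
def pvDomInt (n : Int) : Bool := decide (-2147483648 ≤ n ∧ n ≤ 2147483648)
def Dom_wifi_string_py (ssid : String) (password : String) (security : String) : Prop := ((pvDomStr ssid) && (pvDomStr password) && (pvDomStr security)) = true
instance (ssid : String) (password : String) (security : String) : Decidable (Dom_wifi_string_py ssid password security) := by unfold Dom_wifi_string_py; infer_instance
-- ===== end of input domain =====

-- B replaces the five sequential whole-string replace passes by one per-character pass
-- and builds the result by direct concatenation instead of a parts list + join. (objective: idiomatic)

-- ===== PORT A =====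
-- A's inner _escape: five sequential str.replace passes, in A's order
def escapeA (s : String) : String :=
  let s := PySem.Str.replace s "\\" "\\\\"
  let s := PySem.Str.replace s ";" "\\;"
  let s := PySem.Str.replace s "," "\\,"
  let s := PySem.Str.replace s ":" "\\:"
  PySem.Str.replace s "\"" "\\\""

def wifi_string_py (ssid : String) (password : String) (security : String) : String :=
  let sec := if security = "" then "WPA" else PySem.Str.upper security
  let sec := if sec = "WPA" ∨ sec = "WEP" ∨ sec = "nopass" then sec else "WPA"
  let parts := ["WIFI:T:" ++ sec, "S:" ++ escapeA ssid]
  let parts := if sec ≠ "nopass" ∧ password ≠ "" then parts ++ ["P:" ++ escapeA password] else parts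
  PySem.Str.join ";" parts ++ ";;"

-- ===== PORT B =====
-- B's inner _escape: one pass; "".join(gen) over chars ported as a flatMap over the char list
def escChar (c : Char) : List Char :=
  if c ∈ ['\\', ';', ',', ':', '\"'] then ['\\', c] else [c]

def escapeB (s : String) : String :=
  String.ofList (s.toList.flatMap escChar)

def wifi_string_py_alt (ssid : String) (password : String) (security : String) : String :=
  let sec := if security = "" then "WPA" else PySem.Str.upper security
  let sec := if sec = "WPA" ∨ sec = "WEP" ∨ sec = "nopass" then sec else "WPA"
  let res := "WIFI:T:" ++ sec ++ ";S:" ++ escapeB ssid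
  let res := if sec ≠ "nopass" ∧ password ≠ "" then res ++ ";P:" ++ escapeB password else res
  res ++ ";;"

-- ===== PRECONDITION & SPEC =====
def Spec_wifi_string_py (ssid : String) (password : String) (security : String) (out : String) : Prop := out = wifi_string_py_alt ssid password security
instance (ssid : String) (password : String) (security : String) (out : String) : Decidable (Spec_wifi_string_py ssid password security out) := by unfold Spec_wifi_string_py; infer_instance

-- ===== CLAIM (what is proved, stated in full; the proofs are below) =====
def Claim_equal_wifi_string_py : Prop := ∀ (ssid : String) (password : String) (security : String), Dom_wifi_string_py ssid password security → Spec_wifi_string_py ssid password security (wifi_string_py ssid password security)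

-- ===== LEMMAS AND PROOFS =====

-- single-character replace is a per-character flatMap
theorem replace_go_single (o : Char) (new : List Char) :
    ∀ (l acc : List Char) (fuel : Nat), l.length ≤ fuel →
      PySem.Chars.replace.go [o] new fuel l acc
        = acc.reverse ++ l.flatMap (fun c => if c = o then new else [c]) := by
  intro l
  induction l with
  | nil =>
    intro acc fuel _
    cases fuel <;> simp [PySem.Chars.replace.go]
  | cons c t ih =>
    intro acc fuel hf
    cases fuel with
    | zero => simp at hf
    | succ f =>
      by_cases h : c = o
      · subst h
        have hp : List.isPrefixOf [c] (c :: t) = true := by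
          simp [List.isPrefixOf]
        rw [PySem.Chars.replace.go]
        simp only [hp, if_true, List.length_cons, List.length_nil,
          Nat.zero_add, List.drop_succ_cons, List.drop_zero]
        rw [ih (new.reverse ++ acc) f (by simpa using Nat.le_of_succ_le_succ hf)]
        simp
      · have hp : List.isPrefixOf [o] (c :: t) = false := by
          simp [List.isPrefixOf]
          exact fun hco => h hco.symm
        rw [PySem.Chars.replace.go]
        simp only [hp, if_false, Bool.false_eq_true]
        rw [ih (c :: acc) f (by simpa using Nat.le_of_succ_le_succ hf)]
        simp [h]

theorem replace_single (s : List Char) (o : Char) (new : List Char) :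
    PySem.Chars.replace s [o] new = s.flatMap (fun c => if c = o then new else [c]) := by
  rw [PySem.Chars.replace]
  rw [if_neg (by simp)]
  exact (replace_go_single o new s [] s.length le_rfl).trans (by simp)

theorem escapeA_eq_escapeB (s : String) : escapeA s = escapeB s := by
  unfold escapeA escapeB PySem.Str.replace
  simp only [String.toList_ofList]
  rw [show ("\\" : String).toList = ['\\'] from rfl,
      show ("\\\\" : String).toList = ['\\','\\'] from rfl,
      show (";" : String).toList = [';'] from rfl,
      show ("\\;" : String).toList = ['\\',';'] from rfl,
      show ("," : String).toList = [','] from rfl,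
      show ("\\," : String).toList = ['\\',','] from rfl,
      show (":" : String).toList = [':'] from rfl,
      show ("\\:" : String).toList = ['\\',':'] from rfl,
      show ("\"" : String).toList = ['\"'] from rfl,
      show ("\\\"" : String).toList = ['\\','\"'] from rfl]
  rw [replace_single, replace_single, replace_single, replace_single, replace_single]
  simp only [List.flatMap_assoc]
  refine congrArg String.ofList (congrFun (congrArg List.flatMap (funext fun c => ?_)) s.toList)
  unfold escChar
  by_cases h1 : c = '\\' <;> by_cases h2 : c = ';' <;> by_cases h3 : c = ',' <;>
    by_cases h4 : c = ':' <;> by_cases h5 : c = '\"' <;>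
    simp_all

-- ===== VERDICT (by name: the statement is the Claim_ definition above) =====
theorem wifi_string_py_spec : Claim_equal_wifi_string_py := by
  intro ssid password security _
  unfold Spec_wifi_string_py wifi_string_py wifi_string_py_alt
  simp only [escapeA_eq_escapeB]
  split_ifs <;>
    rw [String.ext_iff] <;>
    simp [PySem.Str.join, PySem.Chars.join, List.intercalate]
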